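-- pv_equiv track=rewrite | github.com/Raffson/SmartNinja-Python | Chapter 5-12/Extra/small_math_lib.py | _pascal_recursive
-- ===== SOURCE A (Python) =====
-- def _pascal_recursive(n=10, prev=None):
--     prev = list() if prev is None else prev
--     if n >= 0:
--         nextt = [1]
--         for i in range(len(prev)-1):
--             nextt.append(prev[i]+prev[i+1])
--         nextt.append(1)
--         return prev + (_pascal_recursive(n-1, nextt))
--     else:
--         return []
-- ===== SOURCE B (Python) =====
-- def _pascal_recursive(n=10, prev=None):
--     row = list(prev) if prev is not None else []
--     rows = []
--     for _ in range(n + 1):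
--         rows.append(row)
--         row = [1] + [a + b for a, b in zip(row, row[1:])] + [1]
--     return [x for r in rows for x in r]
-- ===== Notes on version B (the rewrite author's own statement) =====
-- stated objective: alternative
-- what changed: Replaced A's linear recursion, which copies the entire remaining result at every level via 'prev + recursive(...)', with a staged iterative version: a zip-based next-row step, a loop over range(n+1) collecting the rows into a list, and one final flatten.
import Mathlib
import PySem

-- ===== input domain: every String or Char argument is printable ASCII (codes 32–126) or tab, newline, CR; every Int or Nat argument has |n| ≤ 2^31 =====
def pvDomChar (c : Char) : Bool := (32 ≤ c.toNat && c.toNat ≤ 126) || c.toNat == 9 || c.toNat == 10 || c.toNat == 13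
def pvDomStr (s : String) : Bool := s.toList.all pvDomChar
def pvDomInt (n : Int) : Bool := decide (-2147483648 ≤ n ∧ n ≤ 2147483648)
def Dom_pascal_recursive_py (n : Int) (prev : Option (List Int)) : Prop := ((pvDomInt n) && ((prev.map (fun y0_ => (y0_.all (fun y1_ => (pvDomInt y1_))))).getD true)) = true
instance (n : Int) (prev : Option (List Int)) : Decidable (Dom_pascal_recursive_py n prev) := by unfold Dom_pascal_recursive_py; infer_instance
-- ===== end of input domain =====

-- B replaces A's linear recursion (prev + recursive call, which re-copies the whole
-- remaining result at every level) with a staged iterative version: zip-based next-row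
-- step, a counted loop collecting the rows, then one flatten.

-- ===== PORT A =====
-- the for-loop building nextt: foldl over range(len(prev)-1) appending prev[i]+prev[i+1]
def pvNextA (prev : List Int) : List Int :=
  ((PySem.List.pyRange 0 ((prev.length : Int) - 1) 1).foldl
      (fun nextt i => nextt ++ [PySem.List.pyGetD prev i 0 + PySem.List.pyGetD prev (i + 1) 0])
      [1]) ++ [1]

def pvPascalA (n : Int) (prev : List Int) : List Int :=
  if n ≥ 0 then prev ++ pvPascalA (n - 1) (pvNextA prev) else []
termination_by (n + 1).toNat
decreasing_by omega

def pascal_recursive_py (n : Int) (prev : Option (List Int)) : List Int :=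
  pvPascalA n (prev.getD [])

-- ===== PORT B =====
-- row = [1] + [a + b for a, b in zip(row, row[1:])] + [1]
def pvStepB (row : List Int) : List Int :=
  1 :: (List.zipWith (· + ·) row (PySem.List.slice row (some 1) none) ++ [1])

-- the for-loop over range(n+1): collect `count` successive rows into a list of rows
def pvRowsB : Nat → List Int → List (List Int)
  | 0, _ => []
  | count + 1, row => row :: pvRowsB count (pvStepB row)

def pascal_recursive_py_alt (n : Int) (prev : Option (List Int)) : List Int :=
  (pvRowsB (n + 1).toNat (prev.getD [])).flatten

-- ===== PRECONDITION & SPEC =====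
def Spec_pascal_recursive_py (n : Int) (prev : Option (List Int)) (out : List Int) : Prop := out = pascal_recursive_py_alt n prev
instance (n : Int) (prev : Option (List Int)) (out : List Int) : Decidable (Spec_pascal_recursive_py n prev out) := by unfold Spec_pascal_recursive_py; infer_instance

-- ===== CLAIM (what is proved, stated in full; the proofs are below) =====
def Claim_equal_pascal_recursive_py : Prop := ∀ (n : Int) (prev : Option (List Int)), Dom_pascal_recursive_py n prev → Spec_pascal_recursive_py n prev (pascal_recursive_py n prev)

-- ===== LEMMAS AND PROOFS =====
lemma pvPascalA_neg (n : Int) (row : List Int) (h : n < 0) : pvPascalA n row = [] := by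
  rw [pvPascalA]
  simp [show ¬ n ≥ 0 by omega]

lemma pvMap_eq_zip (row : List Int) :
    (PySem.List.pyRange 0 ((row.length : Int) - 1) 1).map
        (fun i => PySem.List.pyGetD row i 0 + PySem.List.pyGetD row (i + 1) 0)
      = List.zipWith (· + ·) row row.tail := by
  apply List.ext_getElem
  · simp [PySem.List.length_pyRange_one]
  · intro k h1 h2
    have hk : k < row.length - 1 := by
      simpa [PySem.List.length_pyRange_one] using h1
    simp only [List.getElem_map, PySem.List.getElem_pyRange_one, List.getElem_zipWith]
    have h0 : PySem.List.pyGetD row ((0 : Int) + (k : Int)) 0 = row[k]'(by omega) := by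
      rw [zero_add, PySem.List.pyGetD_eq_getElem row (i := (k : Int)) 0 (by omega) (by omega)]
      simp
    have h1' : PySem.List.pyGetD row ((0 : Int) + (k : Int) + 1) 0 = row[k + 1]'(by omega) := by
      rw [zero_add, PySem.List.pyGetD_eq_getElem row (i := (k : Int) + 1) 0 (by omega) (by omega)]
      congr 1
    rw [h0, h1', List.getElem_tail]

lemma pvNext_eq (row : List Int) : pvNextA row = pvStepB row := by
  unfold pvNextA pvStepB
  rw [PySem.List.foldl_append_singleton_eq_map, pvMap_eq_zip,
    PySem.List.slice_from row (by norm_num : (0:Int) ≤ 1)]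
  simp [List.drop_one]

lemma pvLoop_eq : ∀ (m : Nat) (row : List Int),
    (pvRowsB m row).flatten = pvPascalA ((m : Int) - 1) row := by
  intro m
  induction m with
  | zero =>
    intro row
    rw [pvPascalA]
    simp [pvRowsB]
  | succ m ih =>
    intro row
    rw [pvPascalA]
    have h : ((m : Int) + 1 - 1 ≥ 0) := by omega
    push_cast
    simp only [h, if_pos, pvRowsB, List.flatten_cons, ih, pvNext_eq]
    norm_num

-- ===== VERDICT (by name: the statement is the Claim_ definition above) =====
theorem pascal_recursive_py_spec : Claim_equal_pascal_recursive_py := by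
  intro n prev _
  unfold Spec_pascal_recursive_py pascal_recursive_py pascal_recursive_py_alt
  rw [pvLoop_eq]
  by_cases h : -1 ≤ n
  · congr 1
    omega
  · rw [pvPascalA_neg n _ (by omega), pvPascalA_neg _ _ (by omega)]
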